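-- pv_equiv track=rewrite | github.com/miliar/Code_Jam_Webscraper | solutions_python/solutions_year13_round3_nr1/484.py | get_con_groups
-- ===== SOURCE A (Python) =====
-- vocals = ('a','e','i','o','u')
--
-- def get_con_groups(s,n):
--     res = []
--     start = -1
--     for i in range(len(s)):
--         if start == -1 and s[i] not in vocals:
--             start = i
--         if start != -1 and s[i] in vocals:
--             if i-start >= n:
--                 res.append((start,i-1))
--             start = -1
--     if start != -1 and len(s) - start >= n:
--         res.append((start,len(s)-1))
--     return res
-- ===== SOURCE B (Python) =====
-- def get_con_groups(s, n):
--     vowels = set('aeiou')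
--     bounds = [-1] + [i for i, c in enumerate(s) if c in vowels] + [len(s)]
--     return [(a + 1, b - 1) for a, b in zip(bounds, bounds[1:])
--             if b - a - 1 >= n and b - a - 1 >= 1]
-- ===== Notes on version B (the rewrite author's own statement) =====
-- stated objective: simpler
-- what changed: Replaces A's stateful sentinel-tracking scan (start=-1 bookkeeping plus a trailing flush) by one comprehension collecting vowel positions and a zip over consecutive boundaries that yields each sufficiently long consonant run directly.
import Mathlib
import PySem

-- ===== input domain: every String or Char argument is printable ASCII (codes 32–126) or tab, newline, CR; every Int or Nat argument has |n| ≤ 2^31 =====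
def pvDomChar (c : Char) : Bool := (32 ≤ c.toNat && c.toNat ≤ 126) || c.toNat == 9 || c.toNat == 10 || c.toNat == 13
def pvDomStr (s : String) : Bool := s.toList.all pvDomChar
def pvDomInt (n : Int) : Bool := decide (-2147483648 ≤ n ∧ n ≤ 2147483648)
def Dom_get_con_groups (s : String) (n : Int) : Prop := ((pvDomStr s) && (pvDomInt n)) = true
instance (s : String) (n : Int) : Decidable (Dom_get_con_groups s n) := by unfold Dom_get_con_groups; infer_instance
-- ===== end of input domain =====

-- B replaces A's sentinel state machine by one pass collecting vowel positions and a zip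
-- over consecutive boundaries (objective: simpler; same return value, no side effects).

-- ===== PORT A =====
-- vocals = ('a','e','i','o','u')
def pvVocalsA : List Char := ['a','e','i','o','u']

-- enumeration of the characters with their indices; 'for i in range(len(s)): s[i]' reads
-- exactly the i-th character, so folding over the indexed characters is exact here.
def pvEnumFrom (i : Int) : List Char → List (Int × Char)
  | [] => []
  | c :: cs => (i, c) :: pvEnumFrom (i + 1) cs

-- the loop body: state is (res, start)
def pvStepA (n : Int) (st : List (Int × Int) × Int) (ic : Int × Char) : List (Int × Int) × Int :=
  let start := if st.2 == -1 && !(pvVocalsA.contains ic.2) then ic.1 else st.2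
  if start != -1 && pvVocalsA.contains ic.2 then
    (if n ≤ ic.1 - start then st.1 ++ [(start, ic.1 - 1)] else st.1, -1)
  else (st.1, start)

-- the trailing 'if start != -1 and len(s) - start >= n' after the loop
def pvFinishA (n len : Int) (r : List (Int × Int) × Int) : List (Int × Int) :=
  if r.2 != -1 && (n ≤ len - r.2) then r.1 ++ [(r.2, len - 1)] else r.1

def get_con_groups (s : String) (n : Int) : List (Int × Int) :=
  let cs := s.toList
  pvFinishA n (cs.length : Int) ((pvEnumFrom 0 cs).foldl (pvStepA n) ([], -1))

-- ===== PORT B =====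
def pvIsVowelB (c : Char) : Bool := c == 'a' || c == 'e' || c == 'i' || c == 'o' || c == 'u'

-- [i for i, c in enumerate(s) if c in vowels]
def pvVowelIdx (i : Int) : List Char → List Int
  | [] => []
  | c :: cs => if pvIsVowelB c then i :: pvVowelIdx (i + 1) cs else pvVowelIdx (i + 1) cs

-- the comprehension over zip(bounds, bounds[1:])
def pvPairsB (n : Int) (l : List Int) : List (Int × Int) :=
  (l.zip l.tail).filterMap (fun ab =>
    if n ≤ ab.2 - ab.1 - 1 ∧ 1 ≤ ab.2 - ab.1 - 1 then some (ab.1 + 1, ab.2 - 1) else none)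

def get_con_groups_alt (s : String) (n : Int) : List (Int × Int) :=
  let cs := s.toList
  pvPairsB n (-1 :: (pvVowelIdx 0 cs ++ [(cs.length : Int)]))

-- ===== PRECONDITION & SPEC =====
def Spec_get_con_groups (s : String) (n : Int) (out : List (Int × Int)) : Prop := out = get_con_groups_alt s n
instance (s : String) (n : Int) (out : List (Int × Int)) : Decidable (Spec_get_con_groups s n out) := by unfold Spec_get_con_groups; infer_instance

-- ===== CLAIM (what is proved, stated in full; the proofs are below) =====
def Claim_equal_get_con_groups : Prop := ∀ (s : String) (n : Int), Dom_get_con_groups s n → Spec_get_con_groups s n (get_con_groups s n)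

-- ===== LEMMAS AND PROOFS =====

lemma pvPairsB_cons (n a b : Int) (t : List Int) :
    pvPairsB n (a :: b :: t) =
      (if n ≤ b - a - 1 ∧ 1 ≤ b - a - 1 then [(a + 1, b - 1)] else []) ++ pvPairsB n (b :: t) := by
  simp only [pvPairsB, List.tail_cons, List.zip_cons_cons, List.filterMap_cons]
  split_ifs <;> simp

lemma pv_vowel_mem (c : Char) (h : pvIsVowelB c = true) : c ∈ pvVocalsA := by
  simp only [pvIsVowelB, Bool.or_eq_true, beq_iff_eq] at h
  simp [pvVocalsA]
  tauto

lemma pv_vowel_not_mem (c : Char) (h : pvIsVowelB c = false) : c ∉ pvVocalsA := by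
  simp only [pvIsVowelB, Bool.or_eq_false_iff, beq_eq_false_iff_ne] at h
  simp [pvVocalsA]
  tauto

-- the fold invariant: with suffix cs at position p and start state 'start', finishing the
-- loop yields res ++ the boundary pairs computed from 'prev' (prev = p-1 when no open run,
-- prev = start-1 when a run opened at start ≤ p-1).
lemma pvLoop (n : Int) (cs : List Char) : ∀ (p : Int) (res : List (Int × Int)) (start prev : Int),
    0 ≤ p →
    ((start = -1 ∧ prev = p - 1) ∨ (start ≠ -1 ∧ prev = start - 1 ∧ start ≤ p - 1)) →
    pvFinishA n (p + (cs.length : Int)) ((pvEnumFrom p cs).foldl (pvStepA n) (res, start)) =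
      res ++ pvPairsB n (prev :: (pvVowelIdx p cs ++ [p + (cs.length : Int)])) := by
  induction cs with
  | nil =>
    intro p res start prev _ hst
    simp only [pvEnumFrom, List.foldl_nil, pvVowelIdx, List.length_nil, Nat.cast_zero,
      List.nil_append, add_zero]
    rcases hst with ⟨h1, h2⟩ | ⟨h1, h2, h3⟩
    · subst h1 h2
      simp [pvFinishA, pvPairsB]
    · subst h2
      rw [pvPairsB_cons]
      have hc : (n ≤ p - (start - 1) - 1 ∧ 1 ≤ p - (start - 1) - 1) ↔ n ≤ p - start := by
        omega
      simp only [pvFinishA]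
      have hb : (start != -1) = true := by simp [h1]
      rw [hb]
      by_cases hn : n ≤ p - start
      · rw [if_pos (hc.mpr hn)]
        have : start - 1 + 1 = start := by ring
        simp [pvPairsB, hn, this]
      · rw [if_neg (fun h => hn (hc.mp h))]
        simp [pvPairsB, hn]
  | cons c cs ih =>
    intro p res start prev hp hst
    simp only [pvEnumFrom, List.foldl_cons, List.length_cons, Nat.cast_add, Nat.cast_one]
    rw [show p + ((cs.length : Int) + 1) = (p + 1) + (cs.length : Int) from by ring]
    by_cases hv : pvIsVowelB c
    · have hm : c ∈ pvVocalsA := pv_vowel_mem c hv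
      simp only [pvVowelIdx, hv, if_pos, List.cons_append]
      rcases hst with ⟨h1, h2⟩ | ⟨h1, h2, h3⟩
      · -- no open run, vowel: state unchanged
        subst h1 h2
        have hstep : pvStepA n (res, -1) (p, c) = (res, -1) := by
          simp [pvStepA, hm]
        rw [hstep, ih (p + 1) res (-1) p (by omega) (Or.inl ⟨rfl, by ring⟩), pvPairsB_cons]
        have : ¬ (n ≤ p - (p - 1) - 1 ∧ 1 ≤ p - (p - 1) - 1) := by omega
        rw [if_neg this]
        simp
      · -- vowel closes the open run
        subst h2
        have hstep : pvStepA n (res, start) (p, c) =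
            (if n ≤ p - start then res ++ [(start, p - 1)] else res, -1) := by
          have hb : (start == -1) = false := by simp [h1]
          simp [pvStepA, hm, hb]
          exact fun h => absurd h h1
        rw [hstep, ih (p + 1) _ (-1) p (by omega) (Or.inl ⟨rfl, by ring⟩), pvPairsB_cons]
        have hc : (n ≤ p - (start - 1) - 1 ∧ 1 ≤ p - (start - 1) - 1) ↔ n ≤ p - start := by omega
        by_cases hn : n ≤ p - start
        · rw [if_pos hn, if_pos (hc.mpr hn)]
          have : start - 1 + 1 = start := by ring
          simp [this]
        · rw [if_neg hn, if_neg (fun h => hn (hc.mp h))]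
          simp
    · have hm : c ∉ pvVocalsA := pv_vowel_not_mem c (by simpa using hv)
      simp only [pvVowelIdx, hv, if_neg, Bool.false_eq_true, not_false_eq_true]
      rcases hst with ⟨h1, h2⟩ | ⟨h1, h2, h3⟩
      · -- consonant opens a run at p
        subst h1 h2
        have hstep : pvStepA n (res, -1) (p, c) = (res, p) := by
          simp [pvStepA, hm]
        rw [hstep, ih (p + 1) res p (p - 1) (by omega) (Or.inr ⟨by omega, by ring, by omega⟩)]
      · -- consonant keeps the run open
        subst h2
        have hstep : pvStepA n (res, start) (p, c) = (res, start) := by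
          have hb : (start == -1) = false := by simp [h1]
          simp [pvStepA, hm, hb]
        rw [hstep, ih (p + 1) res start (start - 1) (by omega) (Or.inr ⟨h1, rfl, by omega⟩)]

-- ===== VERDICT (by name: the statement is the Claim_ definition above) =====
theorem get_con_groups_spec : Claim_equal_get_con_groups := by
  intro s n _
  unfold Spec_get_con_groups get_con_groups get_con_groups_alt
  have := pvLoop n s.toList 0 [] (-1) (-1) (by omega) (Or.inl ⟨rfl, by ring⟩)
  simpa using this
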